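-- pv_equiv track=rewrite | github.com/bespoke-silicon-group/reallm | ASAP/kernel_generation.py | gen_moe_parallelism
-- ===== SOURCE A (Python) =====
-- def gen_moe_parallelism(num_nodes: int):
--     all_parallelism = [] # List of tuples (expert_parallelism, tensor_parallelism, pipeline_parallelism, context_parallelism)
--     # generate tensor, pipeline and context parallelism
--     for expert_parallelism in range(8, num_nodes+1):
--         for tensor_parallelism in range(1, num_nodes+1):
--             for pipeline_parallelism in range(1, num_nodes+1):
--                 for context_parallelism in range(1, num_nodes+1):
--                     if expert_parallelism * tensor_parallelism * pipeline_parallelism * context_parallelism == num_nodes: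
--                         all_parallelism.append((expert_parallelism, tensor_parallelism, pipeline_parallelism, context_parallelism))
--     return all_parallelism
-- ===== SOURCE B (Python) =====
-- def gen_moe_parallelism(num_nodes: int):
--     # Build the divisor list of num_nodes once, then assemble tuples in three
--     # staged comprehensions (pairs -> triples -> quadruples) over that list.
--     divs = [d for d in range(1, num_nodes + 1) if num_nodes % d == 0]
--
--     def pairs(m):
--         # ascending (p, c) with p * c == m
--         return [(p, m // p) for p in divs if m % p == 0]
--
--     def triples(m):
--         # ascending-lex (t, p, c) with t * p * c == m
--         return [(t, p, c) for t in divs if m % t == 0 for (p, c) in pairs(m // t)]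
--
--     return [(e, t, p, c) for e in divs if e >= 8
--             for (t, p, c) in triples(num_nodes // e)]
-- ===== Notes on version B (the rewrite author's own statement) =====
-- stated objective: faster
-- what changed: Replaces the four nested full-range scans testing the 4-way product by one pass that builds the divisor list of num_nodes, then three staged comprehensions (pairs, triples, quadruples) over that list with the last factor computed by division.
import Mathlib
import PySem

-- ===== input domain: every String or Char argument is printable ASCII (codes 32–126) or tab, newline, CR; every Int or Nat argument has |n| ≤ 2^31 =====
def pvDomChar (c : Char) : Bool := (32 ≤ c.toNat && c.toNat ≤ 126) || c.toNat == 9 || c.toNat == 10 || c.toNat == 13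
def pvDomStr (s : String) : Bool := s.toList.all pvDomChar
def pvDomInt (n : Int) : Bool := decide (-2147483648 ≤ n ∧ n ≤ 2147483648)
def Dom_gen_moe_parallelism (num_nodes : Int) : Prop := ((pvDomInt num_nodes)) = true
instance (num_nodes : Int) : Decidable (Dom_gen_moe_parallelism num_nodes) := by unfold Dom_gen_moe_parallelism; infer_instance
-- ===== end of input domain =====

-- B builds the divisor list of num_nodes once and assembles quadruples by three staged
-- comprehensions over it (last factor by division); objective: faster (asymptotic).

-- ===== PORT A =====
def gen_moe_parallelism (num_nodes : Int) : List (Int × Int × Int × Int) :=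
  (PySem.List.pyRange 8 (num_nodes + 1) 1).foldl (fun acc expert_parallelism =>
    (PySem.List.pyRange 1 (num_nodes + 1) 1).foldl (fun acc tensor_parallelism =>
      (PySem.List.pyRange 1 (num_nodes + 1) 1).foldl (fun acc pipeline_parallelism =>
        (PySem.List.pyRange 1 (num_nodes + 1) 1).foldl (fun acc context_parallelism =>
          if expert_parallelism * tensor_parallelism * pipeline_parallelism * context_parallelism == num_nodes then
            acc ++ [(expert_parallelism, tensor_parallelism, pipeline_parallelism, context_parallelism)]
          else acc) acc) acc) acc) []

-- ===== PORT B =====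
-- divs = [d for d in range(1, n+1) if n % d == 0]
def pvDivs (n : Int) : List Int :=
  (PySem.List.pyRange 1 (n + 1) 1).filter (fun d => PySem.Int.mod n d == 0)

-- pairs(m) = [(p, m // p) for p in divs if m % p == 0]
def pvPairs (divs : List Int) (m : Int) : List (Int × Int) :=
  (divs.filter (fun p => PySem.Int.mod m p == 0)).map (fun p => (p, PySem.Int.floordiv m p))

-- triples(m) = [(t, p, c) for t in divs if m % t == 0 for (p, c) in pairs(m // t)]
def pvTriples (divs : List Int) (m : Int) : List (Int × Int × Int) :=
  divs.flatMap (fun t =>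
    if PySem.Int.mod m t == 0 then
      (pvPairs divs (PySem.Int.floordiv m t)).map (fun pc => (t, pc.1, pc.2))
    else [])

def gen_moe_parallelism_alt (num_nodes : Int) : List (Int × Int × Int × Int) :=
  let divs := pvDivs num_nodes
  divs.flatMap (fun e =>
    if 8 ≤ e then
      (pvTriples divs (PySem.Int.floordiv num_nodes e)).map (fun x => (e, x.1, x.2.1, x.2.2))
    else [])

-- ===== PRECONDITION & SPEC =====
def Spec_gen_moe_parallelism (num_nodes : Int) (out : List (Int × Int × Int × Int)) : Prop := out = gen_moe_parallelism_alt num_nodes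
instance (num_nodes : Int) (out : List (Int × Int × Int × Int)) : Decidable (Spec_gen_moe_parallelism num_nodes out) := by unfold Spec_gen_moe_parallelism; infer_instance

-- ===== CLAIM =====
def Claim_equal_gen_moe_parallelism : Prop := ∀ (num_nodes : Int), Dom_gen_moe_parallelism num_nodes → Spec_gen_moe_parallelism num_nodes (gen_moe_parallelism num_nodes)

-- ===== LEMMAS AND PROOFS =====

-- canonical form shared by both proofs
def canonP (e t q2 : Int) : List (Int × Int × Int × Int) :=
  (PySem.List.pyRange 1 (q2+1) 1).flatMap (fun p => if p ∣ q2 then [(e,t,p, q2 / p)] else [])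

def canonT (e q1 : Int) : List (Int × Int × Int × Int) :=
  (PySem.List.pyRange 1 (q1+1) 1).flatMap (fun t => if t ∣ q1 then canonP e t (q1 / t) else [])

def canon (n : Int) : List (Int × Int × Int × Int) :=
  (PySem.List.pyRange 8 (n+1) 1).flatMap (fun e => if e ∣ n then canonT e (n / e) else [])

lemma filter_single (s n : Int) (hs : 0 < s) (hn : 0 < n) :
    (PySem.List.pyRange 1 (n+1) 1).filter (fun c => s * c == n)
      = if s ∣ n then [n / s] else [] := by
  by_cases h : s ∣ n
  · obtain ⟨q, hq⟩ := h
    have hq' : n / s = q := by rw [hq]; exact Int.mul_ediv_cancel_left q (by omega)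
    have hqpos : 0 < q := by nlinarith
    have hpred : ∀ c ∈ PySem.List.pyRange 1 (n+1) 1, (s * c == n) = (c == q) := by
      intro c _
      rw [Bool.eq_iff_iff]; simp only [beq_iff_eq, hq]
      constructor
      · intro hc; exact mul_left_cancel₀ (by omega) hc
      · intro hc; rw [hc]
    rw [List.filter_congr hpred, List.filter_beq,
        List.count_eq_one_of_mem (PySem.List.nodup_pyRange_one 1 (n+1))
          (PySem.List.mem_pyRange_one.mpr ⟨by omega, by nlinarith⟩)]
    simp [hq', show s ∣ n from ⟨q, hq⟩]
  · rw [if_neg h, List.filter_eq_nil_iff]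
    intro c _ hc
    simp only [beq_iff_eq] at hc
    exact h ⟨c, hc.symm⟩

lemma flatMap_shrink {β : Type} (m N : Int) (hm : 0 < m) (hmN : m ≤ N) (f : Int → List β)
    (h0 : ∀ d, 0 < d → ¬ d ∣ m → f d = []) :
    (PySem.List.pyRange 1 (N+1) 1).flatMap f
      = (PySem.List.pyRange 1 (m+1) 1).flatMap (fun d => if d ∣ m then f d else []) := by
  rw [PySem.List.pyRange_one_append 1 (m+1) (N+1) (by omega) (by omega), List.flatMap_append]
  have h2 : (PySem.List.pyRange (m+1) (N+1) 1).flatMap f = [] := by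
    rw [List.flatMap_eq_nil_iff]; intro d hd
    rw [PySem.List.mem_pyRange_one] at hd
    exact h0 d (by omega) (fun hdvd => by have := Int.le_of_dvd hm hdvd; omega)
  rw [h2, List.append_nil]
  apply List.flatMap_congr; intro d hd
  rw [PySem.List.mem_pyRange_one] at hd
  by_cases h : d ∣ m
  · rw [if_pos h]
  · rw [if_neg h, h0 d (by omega) h]

lemma pLoop_empty (n s e t : Int) (h : ¬ s ∣ n) :
    (PySem.List.pyRange 1 (n+1) 1).flatMap (fun p =>
      ((PySem.List.pyRange 1 (n+1) 1).filter (fun c => s * p * c == n)).map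
        (fun c => (e, t, p, c))) = [] := by
  rw [List.flatMap_eq_nil_iff]; intro p _
  rw [List.map_eq_nil_iff, List.filter_eq_nil_iff]
  intro c _ hc
  simp only [beq_iff_eq] at hc
  exact h ⟨p * c, by rw [← hc]; ring⟩

lemma levelP (n s q e t : Int) (hs : 0 < s) (hn : 0 < n) (hq : n = s * q) :
    (PySem.List.pyRange 1 (n+1) 1).flatMap (fun p =>
      ((PySem.List.pyRange 1 (n+1) 1).filter (fun c => s * p * c == n)).map
        (fun c => (e, t, p, c)))
    = canonP e t q := by
  have hqpos : 0 < q := by nlinarith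
  have step1 : (PySem.List.pyRange 1 (n+1) 1).flatMap (fun p =>
      ((PySem.List.pyRange 1 (n+1) 1).filter (fun c => s * p * c == n)).map
        (fun c => (e, t, p, c)))
    = (PySem.List.pyRange 1 (n+1) 1).flatMap (fun p => if p ∣ q then [(e, t, p, q / p)] else []) := by
    apply List.flatMap_congr; intro p hp
    rw [PySem.List.mem_pyRange_one] at hp
    have hsp : 0 < s * p := mul_pos hs (by omega)
    rw [filter_single (s * p) n hsp hn]
    by_cases hd : p ∣ q
    · have hspn : s * p ∣ n := by rw [hq]; exact mul_dvd_mul_left s hd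
      rw [if_pos hspn, if_pos hd]
      obtain ⟨r, hr⟩ := hd
      have hn2 : n = s * p * r := by rw [hq, hr]; ring
      rw [hn2, Int.mul_ediv_cancel_left r (by omega), hr,
          Int.mul_ediv_cancel_left r (by omega)]
      simp
    · have hns : ¬ s * p ∣ n := by
        rintro ⟨k, hk⟩
        exact hd ⟨k, mul_left_cancel₀ (show s ≠ 0 by omega) (by rw [← hq, hk]; ring)⟩
      rw [if_neg hns, if_neg hd]; simp
  rw [step1, canonP,
      flatMap_shrink q n hqpos (by nlinarith) _ (fun d _ hnd => by rw [if_neg hnd])]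
  apply List.flatMap_congr; intro d _
  by_cases h : d ∣ q <;> simp [h]

lemma tLoop_empty (n e : Int) (h : ¬ e ∣ n) :
    (PySem.List.pyRange 1 (n+1) 1).flatMap (fun t =>
      (PySem.List.pyRange 1 (n+1) 1).flatMap (fun p =>
        ((PySem.List.pyRange 1 (n+1) 1).filter (fun c => e * t * p * c == n)).map
          (fun c => (e, t, p, c)))) = [] := by
  rw [List.flatMap_eq_nil_iff]; intro t _
  apply pLoop_empty n (e * t) e t
  rintro ⟨k, hk⟩
  exact h ⟨t * k, by rw [hk]; ring⟩

lemma levelT (n e q1 : Int) (he : 0 < e) (hn : 0 < n) (hq : n = e * q1) :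
    (PySem.List.pyRange 1 (n+1) 1).flatMap (fun t =>
      (PySem.List.pyRange 1 (n+1) 1).flatMap (fun p =>
        ((PySem.List.pyRange 1 (n+1) 1).filter (fun c => e * t * p * c == n)).map
          (fun c => (e, t, p, c))))
    = canonT e q1 := by
  have hq1pos : 0 < q1 := by nlinarith
  have step1 : (PySem.List.pyRange 1 (n+1) 1).flatMap (fun t =>
      (PySem.List.pyRange 1 (n+1) 1).flatMap (fun p =>
        ((PySem.List.pyRange 1 (n+1) 1).filter (fun c => e * t * p * c == n)).map
          (fun c => (e, t, p, c))))
    = (PySem.List.pyRange 1 (n+1) 1).flatMap (fun t => if t ∣ q1 then canonP e t (q1 / t) else []) := by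
    apply List.flatMap_congr; intro t ht
    rw [PySem.List.mem_pyRange_one] at ht
    by_cases hd : t ∣ q1
    · rw [if_pos hd]
      obtain ⟨r, hr⟩ := hd
      have hr' : q1 / t = r := by rw [hr]; exact Int.mul_ediv_cancel_left r (by omega)
      rw [hr']
      exact levelP n (e * t) r e t (mul_pos he (by omega)) hn (by rw [hq, hr]; ring)
    · rw [if_neg hd]
      apply pLoop_empty n (e * t) e t
      rintro ⟨k, hk⟩
      exact hd ⟨k, mul_left_cancel₀ (show e ≠ 0 by omega) (by rw [← hq, hk]; ring)⟩
  rw [step1, canonT,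
      flatMap_shrink q1 n hq1pos (by nlinarith) _ (fun d _ hnd => by rw [if_neg hnd])]
  apply List.flatMap_congr; intro d _
  by_cases h : d ∣ q1 <;> simp [h]

lemma A_canon (n : Int) : gen_moe_parallelism n = canon n := by
  unfold gen_moe_parallelism canon
  simp only [PySem.List.foldl_append_if, PySem.List.foldl_append_eq_flatMap, List.nil_append]
  apply List.flatMap_congr; intro e he
  rw [PySem.List.mem_pyRange_one] at he
  by_cases hd : e ∣ n
  · rw [if_pos hd]
    exact levelT n e (n / e) (by omega) (by omega) (Int.eq_mul_of_ediv_eq_right hd rfl)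
  · rw [if_neg hd]
    exact tLoop_empty n e hd

-- ===== B-side lemmas =====

lemma flatMap_ite {α β : Type} (l : List α) (P : α → Prop) [DecidablePred P] (g : α → List β) :
    l.flatMap (fun x => if P x then g x else []) = (l.filter (fun x => decide (P x))).flatMap g := by
  induction l with
  | nil => rfl
  | cons x xs ih =>
    simp only [List.flatMap_cons, List.filter_cons]
    by_cases h : P x <;> simp [h, ih]

lemma flatMap_guard_eq_filter {α β : Type} (l : List α) (c : α → Bool) (g : α → List β) :
    l.flatMap (fun x => if c x then g x else []) = (l.filter c).flatMap g := by
  induction l with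
  | nil => rfl
  | cons x xs ih =>
    simp only [List.flatMap_cons, List.filter_cons]
    by_cases h : c x <;> simp [h, ih]

-- divisors of n that divide m (0 < m ∣ n) are exactly the divisors of m, ascending
lemma divs_filter (n m : Int) (hn : 0 < n) (hm : 0 < m) (hmn : m ∣ n) :
    (pvDivs n).filter (fun d => PySem.Int.mod m d == 0)
      = (PySem.List.pyRange 1 (m+1) 1).filter (fun d => decide (d ∣ m)) := by
  unfold pvDivs
  rw [List.filter_filter]
  have hcongr : ∀ d ∈ PySem.List.pyRange 1 (n+1) 1,
      ((PySem.Int.mod m d == 0) && (PySem.Int.mod n d == 0)) = decide (d ∣ m) := by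
    intro d hd
    by_cases h : d ∣ m
    · have h2 : d ∣ n := dvd_trans h hmn
      simp [PySem.Int.mod_eq_zero_iff_dvd, h, h2]
    · simp [PySem.Int.mod_eq_zero_iff_dvd, h]
  rw [List.filter_congr hcongr]
  have hmle : m ≤ n := Int.le_of_dvd hn hmn
  rw [PySem.List.pyRange_one_append 1 (m+1) (n+1) (by omega) (by omega), List.filter_append]
  have h2 : (PySem.List.pyRange (m+1) (n+1) 1).filter (fun d => decide (d ∣ m)) = [] := by
    rw [List.filter_eq_nil_iff]
    intro d hd
    rw [PySem.List.mem_pyRange_one] at hd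
    simp only [decide_eq_true_eq]
    intro hdvd
    have := Int.le_of_dvd hm hdvd; omega
  rw [h2, List.append_nil]

lemma pairs_eq (n q2 e t : Int) (hn : 0 < n) (hq : 0 < q2) (hd : q2 ∣ n) :
    (pvPairs (pvDivs n) q2).map (fun pc => (e, t, pc.1, pc.2)) = canonP e t q2 := by
  unfold pvPairs canonP
  rw [List.map_map, divs_filter n q2 hn hq hd, flatMap_ite, ← List.map_eq_flatMap]
  apply List.map_congr_left
  intro p hp
  have hp' := List.mem_of_mem_filter hp
  rw [PySem.List.mem_pyRange_one] at hp'
  simp [PySem.Int.floordiv_eq_ediv_of_pos (show (0:Int) < p by omega)]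

lemma triples_eq (n q1 e : Int) (hn : 0 < n) (hq : 0 < q1) (hd : q1 ∣ n) :
    (pvTriples (pvDivs n) q1).map (fun x => (e, x.1, x.2.1, x.2.2)) = canonT e q1 := by
  unfold pvTriples canonT
  rw [List.map_flatMap]
  have step : ∀ x, ((if PySem.Int.mod q1 x == 0 then
        (pvPairs (pvDivs n) (PySem.Int.floordiv q1 x)).map (fun pc => (x, pc.1, pc.2))
      else []).map (fun y : Int × Int × Int => (e, y.1, y.2.1, y.2.2)))
      = (if PySem.Int.mod q1 x == 0 then
          (pvPairs (pvDivs n) (PySem.Int.floordiv q1 x)).map (fun pc => (e, x, pc.1, pc.2))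
        else []) := by
    intro x
    by_cases h : (PySem.Int.mod q1 x == 0) = true
    · simp only [if_pos h, List.map_map]; rfl
    · simp [h]
  simp only [step]
  rw [flatMap_guard_eq_filter, divs_filter n q1 hn hq hd, flatMap_ite]
  apply List.flatMap_congr
  intro t ht
  have htd : t ∣ q1 := by
    have := List.of_mem_filter ht; simpa using this
  have ht' := List.mem_of_mem_filter ht
  rw [PySem.List.mem_pyRange_one] at ht'
  rw [PySem.Int.floordiv_eq_ediv_of_pos (show (0:Int) < t by omega)]
  exact pairs_eq n (q1 / t) e t hn
    (by have := Int.ediv_pos_of_pos_of_dvd hq (by omega) htd; omega)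
    (dvd_trans (⟨t, (Int.ediv_mul_cancel htd).symm⟩ : q1 / t ∣ q1) hd)

lemma eList (n : Int) :
    (PySem.List.pyRange 1 (n+1) 1).filter (fun e => decide (8 ≤ e) && (PySem.Int.mod n e == 0))
      = (PySem.List.pyRange 8 (n+1) 1).filter (fun e => decide (e ∣ n)) := by
  by_cases h : 7 ≤ n
  · rw [PySem.List.pyRange_one_append 1 8 (n+1) (by omega) (by omega), List.filter_append]
    have h1 : (PySem.List.pyRange 1 8 1).filter
        (fun e => decide (8 ≤ e) && (PySem.Int.mod n e == 0)) = [] := by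
      rw [List.filter_eq_nil_iff]
      intro e he
      rw [PySem.List.mem_pyRange_one] at he
      simp [show ¬ (8:Int) ≤ e by omega]
    rw [h1, List.nil_append]
    apply List.filter_congr
    intro e he
    rw [PySem.List.mem_pyRange_one] at he
    rw [Bool.eq_iff_iff]
    simp [show (8:Int) ≤ e from he.1, PySem.Int.mod_eq_zero_iff_dvd]
  · rw [PySem.List.pyRange_one_eq_nil (show n + 1 ≤ 8 by omega), List.filter_nil,
        List.filter_eq_nil_iff]
    intro e he
    rw [PySem.List.mem_pyRange_one] at he
    simp [show ¬ (8:Int) ≤ e by omega]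

lemma B_canon (n : Int) : gen_moe_parallelism_alt n = canon n := by
  unfold gen_moe_parallelism_alt canon
  by_cases hn : 0 < n
  case neg =>
    rw [show pvDivs n = [] from by
      unfold pvDivs
      rw [PySem.List.pyRange_one_eq_nil (by omega)]; rfl]
    rw [PySem.List.pyRange_one_eq_nil (by omega)]
    rfl
  case pos =>
    rw [flatMap_ite, flatMap_ite]
    have hfilter : (pvDivs n).filter (fun e => decide (8 ≤ e))
        = (PySem.List.pyRange 8 (n+1) 1).filter (fun e => decide (e ∣ n)) := by
      unfold pvDivs
      rw [List.filter_filter, eList]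
    rw [hfilter]
    apply List.flatMap_congr
    intro e he
    have hed : e ∣ n := by
      have := List.of_mem_filter he; simpa using this
    have he' := List.mem_of_mem_filter he
    rw [PySem.List.mem_pyRange_one] at he'
    rw [PySem.Int.floordiv_eq_ediv_of_pos (show (0:Int) < e by omega)]
    exact triples_eq n (n / e) e hn
      (by have := Int.ediv_pos_of_pos_of_dvd hn (by omega) hed; omega)
      ⟨e, (Int.ediv_mul_cancel hed).symm⟩

-- ===== VERDICT =====
theorem gen_moe_parallelism_spec : Claim_equal_gen_moe_parallelism := by
  intro num_nodes _
  unfold Spec_gen_moe_parallelism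
  rw [A_canon, B_canon]
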